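-- pv_equiv track=rewrite | github.com/applepc24/jungleAlg | 징검다리_건너기_large.py | find_min_K
-- ===== SOURCE A (Python) =====
-- from collections import deque
--
-- def can_reach(K, A):
--     N = len(A)
--     visited = [False] * N
--     visited[0] = True
--     queue = deque([0])
--
--     while queue:
--         curr = queue.popleft()
--         for next in range(curr + 1, N):
--             cost = (next - curr) * (1 + abs(A[curr] - A[next]))
--             if cost <= K and not visited[next]:
--                 visited[next] = True
--                 queue.append(next)
--     return visited[N -1]
--
-- def find_min_K(N, A):
--     lo, hi = 0, 10**9
--     answer = hi
--     while lo <= hi: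
--         mid = (lo + hi) // 2
--         if can_reach(mid, A):
--             answer = mid
--             hi = mid - 1
--         else:
--             lo = mid + 1
--     return answer
-- ===== SOURCE B (Python) =====
-- def find_min_K(N, A):
--     # Bottleneck (minimax) DP over the forward-complete graph; clamp to 10**9.
--     n = len(A)
--     dp = [0]
--     for j in range(1, n):
--         best = max(dp[0], j * (1 + abs(A[0] - A[j])))
--         for i in range(1, j):
--             c = max(dp[i], (j - i) * (1 + abs(A[i] - A[j])))
--             if c < best:
--                 best = c
--         dp.append(best)
--     return min(dp[n - 1], 10**9)
-- ===== Notes on version B (the rewrite author's own statement) =====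
-- stated objective: faster
-- what changed: Replaced binary search over K with a BFS feasibility test per probe by a single bottleneck (minimax) shortest-path DP over the forward-complete DAG, clamping the result to 10**9.
import Mathlib
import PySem

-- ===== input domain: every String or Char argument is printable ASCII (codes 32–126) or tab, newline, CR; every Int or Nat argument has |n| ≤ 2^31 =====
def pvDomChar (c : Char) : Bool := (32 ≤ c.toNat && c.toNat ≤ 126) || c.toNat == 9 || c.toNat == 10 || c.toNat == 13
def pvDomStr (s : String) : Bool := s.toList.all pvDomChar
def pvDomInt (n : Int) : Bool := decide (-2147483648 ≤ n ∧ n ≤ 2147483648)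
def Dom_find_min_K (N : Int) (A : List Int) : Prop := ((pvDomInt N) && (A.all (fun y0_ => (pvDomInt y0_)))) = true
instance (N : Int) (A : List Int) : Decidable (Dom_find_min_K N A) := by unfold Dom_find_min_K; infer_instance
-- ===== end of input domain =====

-- B replaces A's binary search over K (a BFS feasibility test per probe) by one bottleneck
-- (minimax) shortest-path DP over the forward-complete DAG, clamped to 10^9.

-- ===== PORT A =====
-- inner `for next in range(curr+1, N)` body of can_reach: state = (visited, queue)
def canReachInner (K : Int) (A : List Int) (curr : Nat)
    (st : List Bool × List Nat) (nxt : Nat) : List Bool × List Nat :=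
  let cost : Int := ((nxt : Int) - (curr : Int)) * (1 + |A.getD curr 0 - A.getD nxt 0|)
  if cost ≤ K ∧ st.1.getD nxt false = false then (st.1.set nxt true, st.2 ++ [nxt]) else st

-- `while queue:` loop; fuel only makes the recursion structural — each iteration pops one
-- node and every append flips a visited flag, so fuel n+1 is never exhausted (proved below).
def canReachLoop (K : Int) (A : List Int) (n : Nat) : Nat → List Bool → List Nat → List Bool
  | 0, v, _ => v
  | _ + 1, v, [] => v
  | fuel + 1, v, curr :: rest =>
    let st := (List.range' (curr + 1) (n - (curr + 1))).foldl (canReachInner K A curr) (v, rest)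
    canReachLoop K A n fuel st.1 st.2

def can_reach (K : Int) (A : List Int) : Bool :=
  let n := A.length
  let visited := (List.replicate n false).set 0 true
  (canReachLoop K A n (n + 1) visited [0]).getD (n - 1) false

-- `while lo <= hi:` binary search of find_min_K
def asearch (A : List Int) (lo hi answer : Int) : Int :=
  if lo ≤ hi then
    let mid := PySem.Int.floordiv (lo + hi) 2
    if can_reach mid A then asearch A lo (mid - 1) mid
    else asearch A (mid + 1) hi answer
  else answer
termination_by (hi + 1 - lo).toNat
decreasing_by
  · have := PySem.Int.floordiv_two_mid_bounds (by assumption : lo ≤ hi)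
    omega
  · have := PySem.Int.floordiv_two_mid_bounds (by assumption : lo ≤ hi)
    omega

def find_min_K (N : Int) (A : List Int) : Int := asearch A 0 1000000000 1000000000

-- ===== PORT B =====
def find_min_K_alt (N : Int) (A : List Int) : Int :=
  let n := A.length
  let dp := (List.range' 1 (n - 1)).foldl (fun dp (j : Nat) =>
      dp ++ [(List.range' 1 (j - 1)).foldl (fun best (i : Nat) =>
          let c := max (dp.getD i 0) (((j : Int) - (i : Int)) * (1 + |A.getD i 0 - A.getD j 0|))
          if c < best then c else best)
        (max (dp.getD 0 0) ((j : Int) * (1 + |A.getD 0 0 - A.getD j 0|)))]) [0]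
  min (dp.getD (n - 1) 0) 1000000000

-- ===== PRECONDITION & SPEC =====
-- Pre_ excludes only the empty list, on which Python's A raises IndexError (visited[0]).
def Pre_find_min_K (N : Int) (A : List Int) : Prop := A ≠ []
instance (N : Int) (A : List Int) : Decidable (Pre_find_min_K N A) := by
  unfold Pre_find_min_K; infer_instance

def pvWitness_find_min_K : Int × List Int := (3, [1, 5, 3])

def Spec_find_min_K (N : Int) (A : List Int) (out : Int) : Prop := out = find_min_K_alt N A
instance (N : Int) (A : List Int) (out : Int) : Decidable (Spec_find_min_K N A out) := by
  unfold Spec_find_min_K; infer_instance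

-- ===== CLAIM (what is proved, stated in full; the proofs are below) =====
def Claim_equal_find_min_K : Prop := ∀ (N : Int) (A : List Int), Dom_find_min_K N A → Pre_find_min_K N A → Spec_find_min_K N A (find_min_K N A)


-- ===== LEMMAS AND PROOFS =====

-- edge cost of the stone graph
def pvCost (A : List Int) (i j : Nat) : Int :=
  ((j : Int) - (i : Int)) * (1 + |A.getD i 0 - A.getD j 0|)

-- reachability from stone 0 along forward edges of cost ≤ K
inductive PvReach (K : Int) (A : List Int) : Nat → Prop
  | zero : PvReach K A 0
  | step {i j : Nat} : PvReach K A i → i < j → j < A.length → pvCost A i j ≤ K → PvReach K A j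

lemma pvCost_pos (A : List Int) {i j : Nat} (h : i < j) : 0 < pvCost A i j := by
  have h1 : (1 : Int) ≤ (j : Int) - (i : Int) := by omega
  have h2 : (0 : Int) < 1 + |A.getD i 0 - A.getD j 0| := by positivity
  unfold pvCost; nlinarith

lemma getD_set_self (v : List Bool) {j : Nat} (h : j < v.length) :
    (v.set j true).getD j false = true := by
  simp [List.getD, h]

lemma getD_set_ne (v : List Bool) {i j : Nat} (h : i ≠ j) :
    (v.set j true).getD i false = v.getD i false := by
  simp [List.getD, List.getElem?_set_ne (Ne.symm h)]

lemma getD_replicate_false (n j : Nat) : (List.replicate n false).getD j false = false := by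
  simp [List.getD, List.getElem?_replicate]
  split <;> rfl

lemma count_set_false (v : List Bool) : ∀ (j : Nat), j < v.length → v.getD j false = false →
    (v.set j true).count false + 1 = v.count false := by
  induction v with
  | nil => intro j h; simp at h
  | cons a t ih =>
    intro j h h2
    cases j with
    | zero => simp_all [List.count_cons]
    | succ j' =>
      simp only [List.set, List.count_cons]
      simp at h h2
      have := ih j' h h2
      omega

lemma inner_lemma (K : Int) (A : List Int) (n curr : Nat) (hcn : curr < n)
    (hreach : PvReach K A curr) (hnA : n = A.length) :
    ∀ (l : List Nat) (v : List Bool) (q : List Nat),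
      v.length = n →
      (∀ x ∈ l, curr < x ∧ x < n) →
      (∀ j ∈ q, v.getD j false = true) →
      (∀ j ∈ q, j < n) →
      q.Nodup →
      (∀ j, v.getD j false = true → PvReach K A j) →
      ((l.foldl (canReachInner K A curr) (v, q)).1.length = n ∧
       (l.foldl (canReachInner K A curr) (v, q)).1.count false
         + (l.foldl (canReachInner K A curr) (v, q)).2.length = v.count false + q.length ∧
       (∀ j, v.getD j false = true → (l.foldl (canReachInner K A curr) (v, q)).1.getD j false = true) ∧
       (∀ j, (l.foldl (canReachInner K A curr) (v, q)).1.getD j false = true → PvReach K A j) ∧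
       (∀ j ∈ (l.foldl (canReachInner K A curr) (v, q)).2,
          (l.foldl (canReachInner K A curr) (v, q)).1.getD j false = true) ∧
       (∀ j ∈ (l.foldl (canReachInner K A curr) (v, q)).2, j < n) ∧
       (l.foldl (canReachInner K A curr) (v, q)).2.Nodup ∧
       (∀ j ∈ q, j ∈ (l.foldl (canReachInner K A curr) (v, q)).2) ∧
       (∀ j, (l.foldl (canReachInner K A curr) (v, q)).1.getD j false = true →
          v.getD j false = true ∨ j ∈ (l.foldl (canReachInner K A curr) (v, q)).2) ∧
       (∀ j ∈ l, pvCost A curr j ≤ K → (l.foldl (canReachInner K A curr) (v, q)).1.getD j false = true)) := by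
  intro l
  induction l with
  | nil =>
    intro v q hlen _ hqv hqn hnd hsound
    refine ⟨hlen, rfl, fun j h => h, hsound, hqv, hqn, hnd, fun j h => h,
      fun j h => Or.inl h, fun j hj => absurd hj (by simp)⟩
  | cons x t ih =>
    intro v q hlen hl hqv hqn hnd hsound
    obtain ⟨hx1, hx2⟩ := hl x (by simp)
    have hxlen : x < v.length := by omega
    simp only [List.foldl_cons]
    by_cases hcond : pvCost A curr x ≤ K ∧ v.getD x false = false
    · have hstep : canReachInner K A curr (v, q) x = (v.set x true, q ++ [x]) := by
        simp only [canReachInner]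
        exact if_pos hcond
      rw [hstep]
      have hv1x : (v.set x true).getD x false = true := getD_set_self v hxlen
      have mono1 : ∀ j, v.getD j false = true → (v.set x true).getD j false = true := by
        intro j hj
        by_cases hjx : j = x
        · subst hjx; rw [hcond.2] at hj; exact absurd hj (by simp)
        · rw [getD_set_ne v hjx]; exact hj
      have hxq : x ∉ q := fun hmem => by
        have := hqv x hmem; rw [hcond.2] at this; exact absurd this (by simp)
      obtain ⟨c1, c2, c3, c4, c5, c6, c7, c8, c9, c10⟩ := ih (v.set x true) (q ++ [x])
        (by simpa using hlen)
        (fun y hy => hl y (by simp [hy]))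
        (by
          intro j hj
          rcases List.mem_append.mp hj with hj | hj
          · exact mono1 j (hqv j hj)
          · simp at hj; rw [hj]; exact hv1x)
        (by
          intro j hj
          rcases List.mem_append.mp hj with hj | hj
          · exact hqn j hj
          · simp at hj; omega)
        (by
          rw [List.nodup_append]
          refine ⟨hnd, List.nodup_singleton x, ?_⟩
          intro a ha b hb heq
          rw [List.mem_singleton] at hb
          rw [hb] at heq
          rw [heq] at ha
          exact hxq ha)
        (by
          intro j hj
          by_cases hjx : j = x
          · rw [hjx]
            exact PvReach.step hreach hx1 (hnA ▸ hx2) hcond.1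
          · rw [getD_set_ne v hjx] at hj; exact hsound j hj)
      refine ⟨c1, ?_, ?_, c4, c5, c6, c7, ?_, ?_, ?_⟩
      · have hcnt := count_set_false v x hxlen hcond.2
        simp only [List.length_append, List.length_cons, List.length_nil] at c2 ⊢
        omega
      · intro j hj; exact c3 j (mono1 j hj)
      · intro j hj; exact c8 j (List.mem_append.mpr (Or.inl hj))
      · intro j hj
        rcases c9 j hj with hj' | hj'
        · by_cases hjx : j = x
          · rw [hjx]; exact Or.inr (c8 x (List.mem_append.mpr (Or.inr (by simp))))
          · rw [getD_set_ne v hjx] at hj'; exact Or.inl hj'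
        · exact Or.inr hj'
      · intro j hj hc
        rcases List.mem_cons.mp hj with hj | hj
        · rw [hj]; exact c3 x hv1x
        · exact c10 j hj hc
    · have hstep : canReachInner K A curr (v, q) x = (v, q) := by
        simp only [canReachInner]
        exact if_neg hcond
      rw [hstep]
      obtain ⟨c1, c2, c3, c4, c5, c6, c7, c8, c9, c10⟩ := ih v q hlen
        (fun y hy => hl y (by simp [hy])) hqv hqn hnd hsound
      refine ⟨c1, c2, c3, c4, c5, c6, c7, c8, c9, ?_⟩
      intro j hj hc
      rcases List.mem_cons.mp hj with hj | hj
      · rw [hj] at hc ⊢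
        have hvx : v.getD x false = true := by
          rcases Bool.eq_false_or_eq_true (v.getD x false) with h | h
          · exact h
          · exact absurd ⟨hc, h⟩ hcond
        exact c3 x hvx
      · exact c10 j hj hc

lemma closed_iff (K : Int) (A : List Int) (n : Nat) (hn : n = A.length)
    (v : List Bool) (h0 : v.getD 0 false = true)
    (hsound : ∀ j, v.getD j false = true → PvReach K A j)
    (hcl : ∀ i, v.getD i false = true →
      ∀ j, i < j → j < n → pvCost A i j ≤ K → v.getD j false = true) :
    ∀ j, v.getD j false = true ↔ PvReach K A j := by
  intro j
  constructor
  · exact hsound j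
  · intro h
    induction h with
    | zero => exact h0
    | step hri hij hjn hc ihh => exact hcl _ ihh _ hij (by omega) hc

lemma loop_lemma (K : Int) (A : List Int) (n : Nat) (hn : n = A.length) (hn1 : 0 < n) :
    ∀ (fuel : Nat) (v : List Bool) (q : List Nat),
      v.length = n → v.getD 0 false = true →
      (∀ j ∈ q, v.getD j false = true) → (∀ j ∈ q, j < n) → q.Nodup →
      (∀ j, v.getD j false = true → PvReach K A j) →
      (∀ i, v.getD i false = true → i ∉ q →
        ∀ j, i < j → j < n → pvCost A i j ≤ K → v.getD j false = true) →
      v.count false + q.length ≤ fuel →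
      ∀ j, j < n → ((canReachLoop K A n fuel v q).getD j false = true ↔ PvReach K A j) := by
  intro fuel
  induction fuel with
  | zero =>
    intro v q hlen h0 hqv hqn hnd hsound hcl hfuel j hj
    have hq : q = [] := List.eq_nil_of_length_eq_zero (by omega)
    subst hq
    exact closed_iff K A n hn v h0 hsound (fun i hi => hcl i hi (by simp)) j
  | succ fuel ih =>
    intro v q hlen h0 hqv hqn hnd hsound hcl hfuel j hj
    cases q with
    | nil =>
      exact closed_iff K A n hn v h0 hsound (fun i hi => hcl i hi (by simp)) j
    | cons curr rest =>
      have hcv : v.getD curr false = true := hqv curr (by simp)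
      have hcr : PvReach K A curr := hsound curr hcv
      have hcn : curr < n := hqn curr (by simp)
      obtain ⟨c1, c2, c3, c4, c5, c6, c7, c8, c9, c10⟩ :=
        inner_lemma K A n curr hcn hcr hn (List.range' (curr + 1) (n - (curr + 1))) v rest
          hlen
          (by intro x hx; have := List.mem_range'_1.mp hx; omega)
          (fun j hj => hqv j (by simp [hj]))
          (fun j hj => hqn j (by simp [hj]))
          ((List.nodup_cons.mp hnd).2)
          hsound
      simp only [canReachLoop]
      refine ih _ _ c1 (c3 0 h0) c5 c6 c7 c4 ?_ ?_ j hj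
      · intro i hvi hinq jj hij hjjn hc
        by_cases hic : i = curr
        · subst hic
          exact c10 jj (List.mem_range'_1.mpr ⟨by omega, by omega⟩) hc
        · have hvi' : v.getD i false = true := by
            rcases c9 i hvi with h | h
            · exact h
            · exact absurd h hinq
          have hirest : i ∉ rest := fun hr => hinq (c8 i hr)
          exact c3 jj (hcl i hvi' (by simp [hic, hirest]) jj hij hjjn hc)
      · simp only [List.length_cons] at hfuel
        omega

lemma can_reach_iff (K : Int) (A : List Int) (hA : A ≠ []) :
    (can_reach K A = true ↔ PvReach K A (A.length - 1)) := by
  have hn1 : 0 < A.length := List.length_pos_iff.mpr hA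
  have hlen0 : ((List.replicate A.length false).set 0 true).length = A.length := by simp
  have h00 : ((List.replicate A.length false).set 0 true).getD 0 false = true :=
    getD_set_self _ (by simpa using hn1)
  have honly : ∀ j, ((List.replicate A.length false).set 0 true).getD j false = true → j = 0 := by
    intro j hj
    by_contra hj0
    rw [getD_set_ne _ hj0, getD_replicate_false] at hj
    exact absurd hj (by simp)
  exact loop_lemma K A A.length rfl hn1 (A.length + 1)
    ((List.replicate A.length false).set 0 true) [0]
    hlen0 h00
    (by intro j hj; simp at hj; subst hj; exact h00)
    (by intro j hj; simp at hj; omega)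
    (by simp)
    (by intro j hj; rw [honly j hj]; exact PvReach.zero)
    (by intro i hi hinq; rw [honly i hi] at hinq; simp at hinq)
    (by
      have hc : List.count false ((List.replicate A.length false).set 0 true)
          ≤ A.length := by
        simpa using List.count_le_length
          (a := false) (l := (List.replicate A.length false).set 0 true)
      simp only [List.length_cons, List.length_nil]
      omega)
    (A.length - 1) (by omega)

-- B's dp table after processing j = 1 .. m (exactly the fold of find_min_K_alt)
def dpTable (A : List Int) (m : Nat) : List Int :=
  (List.range' 1 m).foldl (fun dp (j : Nat) =>
      dp ++ [(List.range' 1 (j - 1)).foldl (fun best (i : Nat) =>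
          let c := max (dp.getD i 0) (((j : Int) - (i : Int)) * (1 + |A.getD i 0 - A.getD j 0|))
          if c < best then c else best)
        (max (dp.getD 0 0) ((j : Int) * (1 + |A.getD 0 0 - A.getD j 0|)))]) [0]

lemma range'_one_concat (m : Nat) : List.range' 1 (m + 1) = List.range' 1 m ++ [m + 1] := by
  rw [List.range'_concat]; simp; omega

lemma dpTable_succ (A : List Int) (m : Nat) :
    dpTable A (m + 1) = dpTable A m ++
      [(List.range' 1 (m + 1 - 1)).foldl (fun best (i : Nat) =>
          let c := max ((dpTable A m).getD i 0)
            ((((m + 1 : Nat) : Int) - (i : Int)) * (1 + |A.getD i 0 - A.getD (m + 1) 0|))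
          if c < best then c else best)
        (max ((dpTable A m).getD 0 0) (((m + 1 : Nat) : Int) * (1 + |A.getD 0 0 - A.getD (m + 1) 0|)))] := by
  unfold dpTable
  rw [range'_one_concat, List.foldl_append]
  simp only [List.foldl_cons, List.foldl_nil]

lemma dpTable_length (A : List Int) (m : Nat) : (dpTable A m).length = m + 1 := by
  induction m with
  | zero => rfl
  | succ m ih => rw [dpTable_succ]; simp [ih]

lemma dpTable_getD_mono (A : List Int) : ∀ (m m' : Nat), m ≤ m' → ∀ i ≤ m,
    (dpTable A m').getD i 0 = (dpTable A m).getD i 0 := by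
  intro m m'
  induction m' with
  | zero =>
    intro h i hi
    have hm0 : m = 0 := by omega
    rw [hm0]
  | succ m'' ih =>
    intro h i hi
    rcases Nat.eq_or_lt_of_le h with heq | hlt
    · rw [heq]
    · have hm : m ≤ m'' := by omega
      rw [dpTable_succ, List.getD_append _ _ 0 i (by rw [dpTable_length]; omega)]
      exact ih hm i hi

lemma foldl_min_le_iff (f : Nat → Int) (K : Int) : ∀ (l : List Nat) (b : Int),
    (l.foldl (fun best i => if f i < best then f i else best) b ≤ K) ↔
      (b ≤ K ∨ ∃ i ∈ l, f i ≤ K) := by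
  intro l
  induction l with
  | nil => simp
  | cons x t ih =>
    intro b
    simp only [List.foldl_cons, ih, List.mem_cons]
    constructor
    · rintro (h | h)
      · split at h
        · right; exact ⟨x, Or.inl rfl, by omega⟩
        · left; exact h
      · right; obtain ⟨i, hi, h⟩ := h; exact ⟨i, Or.inr hi, h⟩
    · rintro (h | ⟨i, (rfl | hi), h⟩)
      · left; split <;> omega
      · left; split <;> omega
      · right; exact ⟨i, hi, h⟩

lemma dp_entry (A : List Int) (j m : Nat) (h1 : 1 ≤ j) (hm : j ≤ m) :
    (dpTable A m).getD j 0 = (List.range' 1 (j - 1)).foldl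
      (fun best i => if max ((dpTable A m).getD i 0) (pvCost A i j) < best
                     then max ((dpTable A m).getD i 0) (pvCost A i j) else best)
      (max ((dpTable A m).getD 0 0) (pvCost A 0 j)) := by
  obtain ⟨j', rfl⟩ : ∃ j', j = j' + 1 := ⟨j - 1, by omega⟩
  rw [dpTable_getD_mono A (j' + 1) m hm (j' + 1) le_rfl, dpTable_succ]
  have hb : ∀ b : Int, (dpTable A j' ++ [b]).getD (j' + 1) 0 = b := by
    intro b
    rw [show j' + 1 = (dpTable A j').length from (dpTable_length A j').symm]
    simp
  rw [hb]
  have hinit : max ((dpTable A j').getD 0 0)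
      (((j' + 1 : Nat) : Int) * (1 + |A.getD 0 0 - A.getD (j' + 1) 0|)) =
      max ((dpTable A m).getD 0 0) (pvCost A 0 (j' + 1)) := by
    rw [dpTable_getD_mono A j' m (by omega) 0 (by omega)]
    unfold pvCost
    norm_num
  rw [hinit]
  apply PySem.List.foldl_congr_mem
  intro acc x hx
  have hx' := List.mem_range'_1.mp hx
  show (if max ((dpTable A j').getD x 0)
      ((((j' + 1 : Nat) : Int) - (x : Int)) * (1 + |A.getD x 0 - A.getD (j' + 1) 0|)) < acc
    then max ((dpTable A j').getD x 0)
      ((((j' + 1 : Nat) : Int) - (x : Int)) * (1 + |A.getD x 0 - A.getD (j' + 1) 0|))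
    else acc) = _
  rw [← dpTable_getD_mono A j' m (by omega) x (by omega)]
  rfl

lemma dp_zero (A : List Int) (m : Nat) : (dpTable A m).getD 0 0 = 0 := by
  have := dpTable_getD_mono A 0 m (by omega) 0 le_rfl
  rw [this]
  rfl

lemma dp_nonneg (A : List Int) (m : Nat) : ∀ j ≤ m, 0 ≤ (dpTable A m).getD j 0 := by
  intro j hj
  rcases Nat.eq_zero_or_pos j with hj0 | hj1
  · subst hj0; rw [dp_zero]
  · rw [dp_entry A j m hj1 hj]
    by_contra hneg
    push_neg at hneg
    have hle : ((List.range' 1 (j - 1)).foldl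
        (fun best i => if max ((dpTable A m).getD i 0) (pvCost A i j) < best
                       then max ((dpTable A m).getD i 0) (pvCost A i j) else best)
        (max ((dpTable A m).getD 0 0) (pvCost A 0 j))) ≤ -1 := by omega
    rw [foldl_min_le_iff (fun i => max ((dpTable A m).getD i 0) (pvCost A i j)) (-1)] at hle
    rcases hle with h | ⟨i, hi, h⟩
    · have := pvCost_pos A (show 0 < j by omega)
      simp only [max_le_iff] at h
      omega
    · have := List.mem_range'_1.mp hi
      have := pvCost_pos A (show i < j by omega)
      simp only [max_le_iff] at h
      omega

lemma reach_iff_dp (A : List Int) (K : Int) (hK : 0 ≤ K) (m : Nat) :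
    ∀ j, j < A.length → j ≤ m →
      (PvReach K A j ↔ (dpTable A m).getD j 0 ≤ K) := by
  intro j
  induction j using Nat.strong_induction_on with
  | _ j ihs =>
    intro hjA hjm
    match j, hjA, hjm with
    | 0, hjA, hjm =>
      rw [dp_zero]
      exact ⟨fun _ => hK, fun _ => PvReach.zero⟩
    | j' + 1, hjA, hjm =>
      rw [dp_entry A (j' + 1) m (by omega) hjm,
        foldl_min_le_iff (fun i => max ((dpTable A m).getD i 0) (pvCost A i (j' + 1))) K]
      constructor
      · intro h
        cases h with
        | @step i _ hri hij hjA' hc =>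
          have hidp : (dpTable A m).getD i 0 ≤ K :=
            (ihs i (by omega) (by omega) (by omega)).mp hri
          rcases Nat.eq_zero_or_pos i with hi0 | hi1
          · subst hi0; exact Or.inl (max_le hidp hc)
          · refine Or.inr ⟨i, List.mem_range'_1.mpr ⟨by omega, by omega⟩, max_le hidp hc⟩
      · rintro (h | ⟨i, hi, h⟩)
        · simp only [max_le_iff] at h
          exact PvReach.step PvReach.zero (by omega) hjA h.2
        · have hmem := List.mem_range'_1.mp hi
          simp only [max_le_iff] at h
          exact PvReach.step ((ihs i (by omega) (by omega) (by omega)).mpr h.1)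
            (by omega) hjA h.2

lemma asearch_eq (A : List Int) (t : Int) (ht : 0 ≤ t)
    (hP : ∀ k : Int, 0 ≤ k → (can_reach k A = true ↔ t ≤ k)) :
    ∀ (fl : Nat) (lo hi ans : Int), (hi + 1 - lo).toNat ≤ fl → 0 ≤ lo → lo ≤ t →
      asearch A lo hi ans = if t ≤ hi then t else ans := by
  intro fl
  induction fl with
  | zero =>
    intro lo hi ans hf h0 hlt
    have hlh : ¬ lo ≤ hi := by omega
    rw [asearch, if_neg hlh, if_neg (by omega)]
  | succ fl ih =>
    intro lo hi ans hf h0 hlt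
    rw [asearch]
    by_cases hlh : lo ≤ hi
    · rw [if_pos hlh]
      obtain ⟨hm1, hm2⟩ := PySem.Int.floordiv_two_mid_bounds hlh
      by_cases htm : t ≤ PySem.Int.floordiv (lo + hi) 2
      · rw [if_pos ((hP _ (by omega)).mpr htm)]
        rw [ih lo (PySem.Int.floordiv (lo + hi) 2 - 1) (PySem.Int.floordiv (lo + hi) 2)
          (by omega) h0 hlt]
        split_ifs <;> omega
      · rw [if_neg (fun hcr => htm ((hP _ (by omega)).mp hcr))]
        rw [ih (PySem.Int.floordiv (lo + hi) 2 + 1) hi ans (by omega) (by omega) (by omega)]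
    · rw [if_neg hlh, if_neg (by omega)]

-- ===== VERDICT (by name: the statement is the Claim_ definition above) =====
theorem find_min_K_spec : Claim_equal_find_min_K := by
  intro N A _ hPre
  unfold Spec_find_min_K
  have hn1 : 0 < A.length := List.length_pos_iff.mpr hPre
  have ht : 0 ≤ (dpTable A (A.length - 1)).getD (A.length - 1) 0 :=
    dp_nonneg A (A.length - 1) (A.length - 1) le_rfl
  have hP : ∀ k : Int, 0 ≤ k →
      (can_reach k A = true ↔ (dpTable A (A.length - 1)).getD (A.length - 1) 0 ≤ k) := by
    intro k hk
    rw [can_reach_iff k A hPre]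
    exact reach_iff_dp A k hk (A.length - 1) (A.length - 1) (by omega) le_rfl
  have hA : find_min_K N A =
      if (dpTable A (A.length - 1)).getD (A.length - 1) 0 ≤ 1000000000
      then (dpTable A (A.length - 1)).getD (A.length - 1) 0 else 1000000000 := by
    unfold find_min_K
    exact asearch_eq A _ ht hP 1000000001 0 1000000000 1000000000 (by omega) le_rfl ht
  have hB : find_min_K_alt N A =
      min ((dpTable A (A.length - 1)).getD (A.length - 1) 0) 1000000000 := rfl
  rw [hA, hB, min_def]
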